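-- pv_equiv track=rewrite | github.com/cog-imperial/SnAKe | test_branin.py | map_into_cost_grid
-- ===== SOURCE A (Python) =====
-- def map_into_cost_grid(cost_grid, costs, regret):
--     regret_out = []
--     for c_g in cost_grid:
--         smaller_than_cg = [c <= c_g for c in costs]
--         if False in smaller_than_cg:
--             idx = smaller_than_cg.index(False) - 1
--         else:
--             idx = len(costs) - 1
--         regret_out.append(regret[idx])
--
--     return regret_out
-- ===== SOURCE B (Python) =====
-- def map_into_cost_grid(cost_grid, costs, regret):
--     # prefix maxima of costs: pm[i] = max(costs[:i+1]); nondecreasing by construction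
--     pm = []
--     m = None
--     for c in costs:
--         if m is None or c > m:
--             m = c
--         pm.append(m)
--     out = []
--     for c_g in cost_grid:
--         # binary search: lo = number of prefix maxima <= c_g
--         lo, hi = 0, len(pm)
--         while lo < hi:
--             mid = (lo + hi) // 2
--             if pm[mid] <= c_g:
--                 lo = mid + 1
--             else:
--                 hi = mid
--         out.append(regret[lo - 1])
--     return out
-- ===== Notes on version B (the rewrite author's own statement) =====
-- stated objective: faster
-- what changed: B precomputes the (nondecreasing) prefix-maxima of costs once and binary-searches them per grid point, replacing A's full linear scan of costs for every grid point.
import Mathlib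
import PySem

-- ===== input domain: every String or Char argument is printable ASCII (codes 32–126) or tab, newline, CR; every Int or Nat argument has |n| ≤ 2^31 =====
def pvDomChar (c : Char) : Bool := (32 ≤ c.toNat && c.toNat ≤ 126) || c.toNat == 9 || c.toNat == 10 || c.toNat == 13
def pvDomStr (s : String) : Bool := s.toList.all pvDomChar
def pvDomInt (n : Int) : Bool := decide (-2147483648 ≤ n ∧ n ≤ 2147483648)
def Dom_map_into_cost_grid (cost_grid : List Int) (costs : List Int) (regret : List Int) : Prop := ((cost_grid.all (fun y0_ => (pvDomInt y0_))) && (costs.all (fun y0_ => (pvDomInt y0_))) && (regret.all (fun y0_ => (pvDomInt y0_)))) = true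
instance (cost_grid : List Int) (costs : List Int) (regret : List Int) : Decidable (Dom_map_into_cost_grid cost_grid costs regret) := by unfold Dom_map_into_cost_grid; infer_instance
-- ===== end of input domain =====

-- B replaces A's per-grid-point linear scan of costs by a one-off prefix-maxima array plus a
-- binary search per grid point (claimed objective: faster, asymptotic).


-- ===== PORT A =====
def map_into_cost_grid (cost_grid : List Int) (costs : List Int) (regret : List Int) : List Int :=
  cost_grid.foldl (fun regret_out c_g =>
    let smaller_than_cg := costs.map (fun c => decide (c ≤ c_g))
    let idx : Int :=
      if smaller_than_cg.contains false then
        ((PySem.List.index? smaller_than_cg false).getD 0 : Int) - 1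
      else
        (costs.length : Int) - 1
    regret_out ++ [(PySem.List.pyGet? regret idx).getD 0]) []

-- ===== PORT B =====
-- binary search loop of Source B: first index in [lo, hi) with pm[index] > c_g (hi if none)
def pvBsearch (pm : List Int) (c_g : Int) (lo hi : Nat) : Nat :=
  if _h : lo < hi then
    let mid := (lo + hi) / 2
    if pm.getD mid 0 ≤ c_g then pvBsearch pm c_g (mid + 1) hi
    else pvBsearch pm c_g lo mid
  else lo
termination_by hi - lo
decreasing_by all_goals omega

def map_into_cost_grid_alt (cost_grid : List Int) (costs : List Int) (regret : List Int) : List Int :=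
  let pm := (costs.foldl (fun (acc : List Int × Option Int) c =>
      let m : Int := match acc.2 with
        | none => c
        | some m => if c > m then c else m
      (acc.1 ++ [m], some m)) ([], none)).1
  cost_grid.foldl (fun out c_g =>
    let lo := pvBsearch pm c_g 0 pm.length
    out ++ [(PySem.List.pyGet? regret ((lo : Int) - 1)).getD 0]) []

-- ===== PRECONDITION & SPEC =====
-- Pre_ excludes exactly the inputs where Python A raises an IndexError on regret[idx]:
-- the index A computes for c is (length of the longest all-≤-c prefix of costs) - 1, which must
-- be a valid (possibly -1, i.e. wrapping) Python index into regret.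
def Pre_map_into_cost_grid (cost_grid : List Int) (costs : List Int) (regret : List Int) : Prop :=
  ∀ c ∈ cost_grid, regret ≠ [] ∧ (costs.takeWhile (fun v => decide (v ≤ c))).length ≤ regret.length
instance (cost_grid : List Int) (costs : List Int) (regret : List Int) : Decidable (Pre_map_into_cost_grid cost_grid costs regret) := by unfold Pre_map_into_cost_grid; infer_instance
def pvWitness_map_into_cost_grid : List Int × List Int × List Int := ([0, 3], [1, 2], [5, 7])
def Spec_map_into_cost_grid (cost_grid : List Int) (costs : List Int) (regret : List Int) (out : List Int) : Prop := out = map_into_cost_grid_alt cost_grid costs regret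
instance (cost_grid : List Int) (costs : List Int) (regret : List Int) (out : List Int) : Decidable (Spec_map_into_cost_grid cost_grid costs regret out) := by unfold Spec_map_into_cost_grid; infer_instance

-- ===== CLAIM (what is proved, stated in full; the proofs are below) =====
def Claim_equal_map_into_cost_grid : Prop := ∀ (cost_grid : List Int) (costs : List Int) (regret : List Int), Dom_map_into_cost_grid cost_grid costs regret → Pre_map_into_cost_grid cost_grid costs regret → Spec_map_into_cost_grid cost_grid costs regret (map_into_cost_grid cost_grid costs regret)

-- ===== LEMMAS AND PROOFS =====

-- spec version of Source B's prefix-maxima loop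
def pvPmF (m : Option Int) : List Int → List Int
  | [] => []
  | c :: cs =>
    let m' : Int := match m with
      | none => c
      | some m => if c > m then c else m
    m' :: pvPmF (some m') cs

theorem pvPmF_length (m : Option Int) (cs : List Int) : (pvPmF m cs).length = cs.length := by
  induction cs generalizing m with
  | nil => rfl
  | cons c cs ih => simp [pvPmF, ih]

theorem foldl_pm_eq (cs : List Int) (acc : List Int) (m : Option Int) :
    (cs.foldl (fun (acc : List Int × Option Int) c =>
      let m : Int := match acc.2 with
        | none => c
        | some m => if c > m then c else m
      (acc.1 ++ [m], some m)) (acc, m)).1 = acc ++ pvPmF m cs := by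
  induction cs generalizing acc m with
  | nil => simp [pvPmF]
  | cons c cs ih => simp [pvPmF, List.foldl_cons, ih]

-- all entries of pvPmF (some v) cs are > x when v > x
theorem pvPmF_gt (x v : Int) (hv : x < v) (cs : List Int) :
    ∀ i, i < cs.length → ¬ ((pvPmF (some v) cs).getD i 0 ≤ x) := by
  induction cs generalizing v with
  | nil => intro i hi; simp at hi
  | cons c cs ih =>
    intro i hi
    have hm' : x < (if c > v then c else v) := by split <;> omega
    cases i with
    | zero => simp [pvPmF]; omega
    | succ i =>
      simp only [pvPmF, List.getD_cons_succ]
      exact ih _ hm' i (by simpa using hi)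

-- cons step of the prefix-maxima characterization, shared by both cases of the induction
theorem pvPmF_cons_key (x c m' : Int) (cs : List Int)
    (h1 : c ≤ x → m' ≤ x) (h2 : x < c → x < m')
    (ihcs : ∀ i, i < cs.length → m' ≤ x →
      ((pvPmF (some m') cs).getD i 0 ≤ x ↔
        i < (cs.takeWhile (fun v => decide (v ≤ x))).length)) :
    ∀ i, i < cs.length + 1 →
      ((m' :: pvPmF (some m') cs).getD i 0 ≤ x ↔
        i < ((c :: cs).takeWhile (fun v => decide (v ≤ x))).length) := by
  intro i hi
  by_cases hc : c ≤ x
  · rw [List.takeWhile_cons_of_pos (by simpa using hc), List.length_cons]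
    cases i with
    | zero =>
      simp only [List.getD_cons_zero]
      constructor
      · intro _; omega
      · intro _; exact h1 hc
    | succ i =>
      simp only [List.getD_cons_succ]
      rw [ihcs i (by omega) (h1 hc)]
      omega
  · rw [List.takeWhile_cons_of_neg (by simpa using hc)]
    simp only [List.length_nil]
    have hxm : x < m' := h2 (by omega)
    cases i with
    | zero => simp only [List.getD_cons_zero]; constructor <;> intro h <;> omega
    | succ i =>
      simp only [List.getD_cons_succ]
      constructor
      · intro h; exact absurd h (pvPmF_gt x m' hxm cs i (by omega))
      · omega

-- entry i of the prefix maxima is ≤ x iff i < length of the all-≤-x prefix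
theorem pvPmF_le_iff (x : Int) (cs : List Int) :
    ∀ (m : Option Int), (∀ v, m = some v → v ≤ x) →
    ∀ i, i < cs.length →
      ((pvPmF m cs).getD i 0 ≤ x ↔ i < (cs.takeWhile (fun v => decide (v ≤ x))).length) := by
  induction cs with
  | nil => intro m _ i hi; simp at hi
  | cons c cs ih =>
    intro m hm i hi
    cases m with
    | none =>
      show ((c :: pvPmF (some c) cs).getD i 0 ≤ x ↔ _)
      refine pvPmF_cons_key x c c cs (fun h => h) (fun h => h) ?_ i (by simpa using hi)
      intro j hj hle
      exact ih (some c) (by intro v hv; cases hv; exact hle) j hj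
    | some mv =>
      have hmv : mv ≤ x := hm mv rfl
      show (((if c > mv then c else mv) :: pvPmF (some (if c > mv then c else mv)) cs).getD i 0 ≤ x ↔ _)
      refine pvPmF_cons_key x c (if c > mv then c else mv) cs
        (fun h => by split <;> omega) (fun h => by split <;> omega) ?_ i (by simpa using hi)
      intro j hj hle
      exact ih (some _) (by intro v hv; cases hv; exact hle) j hj

-- binary search returns K whenever the predicate "≤ x" is the prefix-property i < K
theorem pvBsearch_eq (pm : List Int) (x : Int) (K : Nat)
    (hK : ∀ i, i < pm.length → (pm.getD i 0 ≤ x ↔ i < K)) :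
    ∀ n lo hi, hi - lo ≤ n → lo ≤ K → K ≤ hi → hi ≤ pm.length →
      pvBsearch pm x lo hi = K := by
  intro n
  induction n with
  | zero =>
    intro lo hi h1 h2 h3 h4
    rw [pvBsearch]
    have : ¬ lo < hi := by omega
    simp only [this, dite_false]
    omega
  | succ n ih =>
    intro lo hi h1 h2 h3 h4
    rw [pvBsearch]
    by_cases hlt : lo < hi
    · simp only [hlt, dite_true]
      by_cases hle : pm.getD ((lo + hi) / 2) 0 ≤ x
      · have : (lo + hi) / 2 < K := (hK _ (by omega)).mp hle
        simp only [hle, if_pos]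
        exact ih ((lo + hi) / 2 + 1) hi (by omega) (by omega) h3 h4
      · have : ¬ (lo + hi) / 2 < K := fun h => hle ((hK _ (by omega)).mpr h)
        simp only [hle, if_neg, not_false_eq_true]
        exact ih lo ((lo + hi) / 2) (by omega) h2 (by omega) (by omega)
    · simp only [hlt, dite_false]; omega

-- A's index computation equals (length of longest all-≤-c_g prefix) - 1 in both branches
theorem aidx_eq (x : Int) (cs : List Int) :
    (if (cs.map (fun c => decide (c ≤ x))).contains false then
        ((PySem.List.index? (cs.map (fun c => decide (c ≤ x))) false).getD 0 : Int) - 1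
      else
        (cs.length : Int) - 1)
    = ((cs.takeWhile (fun v => decide (v ≤ x))).length : Int) - 1 := by
  induction cs with
  | nil => simp
  | cons c cs ih =>
    by_cases hc : c ≤ x
    · rw [List.takeWhile_cons_of_pos (by simpa using hc)]
      simp only [List.map_cons, decide_eq_true hc]
      have hcont : (true :: cs.map (fun c => decide (c ≤ x))).contains false
          = (cs.map (fun c => decide (c ≤ x))).contains false := by
        simp
      rw [hcont]
      rw [PySem.List.index?_cons_of_ne (List.map (fun c => decide (c ≤ x)) cs)
        (by simp : (true : Bool) ≠ false)]
      by_cases hmem : (cs.map (fun c => decide (c ≤ x))).contains false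
      · have hsome : (PySem.List.index? (cs.map (fun c => decide (c ≤ x))) false).isSome := by
          rw [PySem.List.index?_isSome_iff]; simpa using hmem
        obtain ⟨k, hk⟩ := Option.isSome_iff_exists.mp hsome
        rw [if_pos hmem]
        rw [if_pos hmem, hk] at ih
        rw [hk]
        simp only [Option.map_some, Option.getD_some] at *
        rw [List.length_cons]
        push_cast
        omega
      · rw [if_neg hmem]
        rw [if_neg hmem] at ih
        rw [List.length_cons, List.length_cons]
        push_cast at *
        have hlen : ((cs.takeWhile (fun v => decide (v ≤ x))).length : Int) = (cs.length : Int) := by omega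
        omega
    · rw [List.takeWhile_cons_of_neg (by simpa using hc)]
      simp only [List.map_cons]
      rw [show (decide (c ≤ x)) = false from by simp [hc]]
      rw [PySem.List.index?_cons_self]
      simp

-- the two folds over cost_grid both append one element; reduce to List.map
theorem foldl_append_map {α β : Type} (f : α → β) (l : List α) (acc : List β) :
    l.foldl (fun out x => out ++ [f x]) acc = acc ++ l.map f := by
  induction l generalizing acc with
  | nil => simp
  | cons x l ih => simp [List.foldl_cons, ih]

-- per-grid-point agreement of the two fetched values
theorem per_point_eq (costs regret : List Int) (c_g : Int) :
    (PySem.List.pyGet? regret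
        (if (costs.map (fun c => decide (c ≤ c_g))).contains false then
            ((PySem.List.index? (costs.map (fun c => decide (c ≤ c_g))) false).getD 0 : Int) - 1
          else (costs.length : Int) - 1)).getD 0
    = (PySem.List.pyGet? regret
        ((pvBsearch (pvPmF none costs) c_g 0 (pvPmF none costs).length : Int) - 1)).getD 0 := by
  have hK : ∀ i, i < (pvPmF none costs).length →
      ((pvPmF none costs).getD i 0 ≤ c_g ↔
        i < (costs.takeWhile (fun v => decide (v ≤ c_g))).length) := by
    intro i hi
    exact pvPmF_le_iff c_g costs none (by intro v h; cases h) i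
      (by rwa [pvPmF_length] at hi)
  have hKle : (costs.takeWhile (fun v => decide (v ≤ c_g))).length ≤ (pvPmF none costs).length := by
    rw [pvPmF_length]; exact (List.takeWhile_sublist _).length_le
  have hb : pvBsearch (pvPmF none costs) c_g 0 (pvPmF none costs).length
      = (costs.takeWhile (fun v => decide (v ≤ c_g))).length :=
    pvBsearch_eq _ _ _ hK (pvPmF none costs).length 0 _ (by omega) (by omega) hKle (le_refl _)
  rw [hb, aidx_eq]

-- ===== VERDICT (by name: the statement is the Claim_ definition above) =====
theorem map_into_cost_grid_spec : Claim_equal_map_into_cost_grid := by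
  intro cost_grid costs regret _hdom _hpre
  unfold Spec_map_into_cost_grid map_into_cost_grid map_into_cost_grid_alt
  rw [foldl_pm_eq]
  simp only [List.nil_append]
  rw [foldl_append_map, foldl_append_map]
  simp only [List.nil_append]
  apply List.map_congr_left
  intro c_g _
  exact per_point_eq costs regret c_g
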